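-- pv_equiv track=rewrite | github.com/ookok/LivingTreeAlAgent | client/src/business/idle_grade_system/__init__.py | get_unlocked_features
-- ===== SOURCE A (Python) =====
-- from typing import Dict, List, Optional, Any
--
-- def get_unlocked_features(level: int) -> List[str]:
--     """获取已解锁功能"""
--     features = []
--
--     feature_requirements = {
--         "custom_username_color": 3,
--         "basic_emojis": 3,
--         "animated_avatar": 5,
--         "custom_status": 5,
--         "create_private_groups": 5,
--         "host_events": 5,
--         "3d_avatar": 7,
--         "voice_effects": 7,
--         "found_community": 7,
--         "moderation_powers": 7,
--         "virtual_office": 9,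
--         "ai_assistant": 9,
--         "global_announcement": 9,
--         "feature_request": 9
--     }
--
--     for feature, req_level in feature_requirements.items():
--         if level >= req_level:
--             features.append(feature)
--
--     return features
-- ===== SOURCE B (Python) =====
-- def get_unlocked_features(level: int) -> list:
--     """获取已解锁功能"""
--     unlocks_by_level = [
--         (3, ["custom_username_color", "basic_emojis"]),
--         (5, ["animated_avatar", "custom_status", "create_private_groups", "host_events"]),
--         (7, ["3d_avatar", "voice_effects", "found_community", "moderation_powers"]),
--         (9, ["virtual_office", "ai_assistant", "global_announcement", "feature_request"]),
--     ]
--     features = []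
--     for threshold, group in unlocks_by_level:
--         if level < threshold:
--             break
--         features.extend(group)
--     return features
-- ===== Notes on version B (the rewrite author's own statement) =====
-- stated objective: simpler
-- what changed: B groups features into ascending (threshold, group) buckets and extends the result per bucket with an early break at the first locked threshold, instead of A's flat per-feature scan testing level against each requirement.
import Mathlib
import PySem

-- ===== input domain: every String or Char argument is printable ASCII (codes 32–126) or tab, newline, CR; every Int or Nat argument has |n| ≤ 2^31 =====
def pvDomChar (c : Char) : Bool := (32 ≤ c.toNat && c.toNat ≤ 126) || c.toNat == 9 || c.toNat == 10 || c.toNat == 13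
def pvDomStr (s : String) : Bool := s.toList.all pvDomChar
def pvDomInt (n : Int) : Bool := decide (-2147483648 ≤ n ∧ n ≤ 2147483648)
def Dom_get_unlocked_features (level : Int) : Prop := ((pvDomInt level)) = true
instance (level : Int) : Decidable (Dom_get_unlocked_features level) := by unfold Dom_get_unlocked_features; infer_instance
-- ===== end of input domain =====

-- B groups features into ascending (threshold, group) buckets and extends per bucket
-- with an early break at the first locked threshold (objective: simpler).

-- ===== PORT A =====
def get_unlocked_features (level : Int) : List String :=
  let feature_requirements : List (String × Int) :=
    [("custom_username_color", 3), ("basic_emojis", 3),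
     ("animated_avatar", 5), ("custom_status", 5),
     ("create_private_groups", 5), ("host_events", 5),
     ("3d_avatar", 7), ("voice_effects", 7),
     ("found_community", 7), ("moderation_powers", 7),
     ("virtual_office", 9), ("ai_assistant", 9),
     ("global_announcement", 9), ("feature_request", 9)]
  feature_requirements.foldl
    (fun features fr => if level ≥ fr.2 then features ++ [fr.1] else features) []

-- ===== PORT B =====
-- B-side loop with early break at the first locked threshold
def pvBucketLoop (level : Int) (features : List String) :
    List (Int × List String) → List String
  | [] => features
  | (threshold, group) :: rest =>
      if level < threshold then features
      else pvBucketLoop level (features ++ group) rest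

def get_unlocked_features_alt (level : Int) : List String :=
  let unlocks_by_level : List (Int × List String) :=
    [(3, ["custom_username_color", "basic_emojis"]),
     (5, ["animated_avatar", "custom_status", "create_private_groups", "host_events"]),
     (7, ["3d_avatar", "voice_effects", "found_community", "moderation_powers"]),
     (9, ["virtual_office", "ai_assistant", "global_announcement", "feature_request"])]
  pvBucketLoop level [] unlocks_by_level

-- ===== PRECONDITION & SPEC =====
def Spec_get_unlocked_features (level : Int) (out : List String) : Prop := out = get_unlocked_features_alt level
instance (level : Int) (out : List String) : Decidable (Spec_get_unlocked_features level out) := by unfold Spec_get_unlocked_features; infer_instance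

-- ===== CLAIM (what is proved, stated in full; the proofs are below) =====
def Claim_equal_get_unlocked_features : Prop := ∀ (level : Int), Dom_get_unlocked_features level → Spec_get_unlocked_features level (get_unlocked_features level)

-- ===== LEMMAS AND PROOFS =====

-- ===== VERDICT (by name: the statement is the Claim_ definition above) =====
theorem get_unlocked_features_spec : Claim_equal_get_unlocked_features := by
  intro level _
  unfold Spec_get_unlocked_features
  rcases Int.lt_or_le level 3 with h | h
  · simp [get_unlocked_features, get_unlocked_features_alt, pvBucketLoop, h,
      not_le.mpr h, not_le.mpr (lt_of_lt_of_le h (by norm_num : (3:Int) ≤ 5)),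
      not_le.mpr (lt_of_lt_of_le h (by norm_num : (3:Int) ≤ 7)),
      not_le.mpr (lt_of_lt_of_le h (by norm_num : (3:Int) ≤ 9))]
  rcases Int.lt_or_le level 5 with h5 | h5
  · simp [get_unlocked_features, get_unlocked_features_alt, pvBucketLoop, h, h5,
      not_le.mpr h5, not_lt.mpr h,
      not_le.mpr (lt_of_lt_of_le h5 (by norm_num : (5:Int) ≤ 7)),
      not_le.mpr (lt_of_lt_of_le h5 (by norm_num : (5:Int) ≤ 9))]
  rcases Int.lt_or_le level 7 with h7 | h7
  · simp [get_unlocked_features, get_unlocked_features_alt, pvBucketLoop, h, h5, h7,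
      not_le.mpr h7, not_lt.mpr h, not_lt.mpr h5,
      not_le.mpr (lt_of_lt_of_le h7 (by norm_num : (7:Int) ≤ 9))]
  rcases Int.lt_or_le level 9 with h9 | h9
  · simp [get_unlocked_features, get_unlocked_features_alt, pvBucketLoop, h, h5, h7, h9,
      not_le.mpr h9, not_lt.mpr h, not_lt.mpr h5, not_lt.mpr h7]
  · simp [get_unlocked_features, get_unlocked_features_alt, pvBucketLoop, h, h5, h7, h9,
      not_lt.mpr h, not_lt.mpr h5, not_lt.mpr h7, not_lt.mpr h9]
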